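-- pv_equiv track=rewrite | github.com/beomsun1234/TIL | algorithm/programmers/level2/더 맵게.py | solution
-- ===== SOURCE A (Python) =====
-- import heapq
--
-- def solution(scoville, K):
--     answer = 0
--     heapq.heapify(scoville)
--     while scoville[0] < K:
--         val1 = heapq.heappop(scoville)
--         val2 = heapq.heappop(scoville)
--         heapq.heappush(scoville,val1 + (val2*2))
--         answer+=1
--         if len(scoville) ==1 and scoville[0] < K:
--             return -1
--
--     return answer
-- ===== SOURCE B (Python) =====
-- from collections import deque
--
-- def solution(scoville, K):
--     # Two-queue technique: sort once, then keep the original values in FIFO q1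
--     # and every mixed value in FIFO q2.  Mixed values are appended in an order
--     # that keeps q2 sorted, so the global minimum is always one of the two
--     # fronts and each round touches only the fronts -- no heap and no re-insertion.
--     q1 = deque(sorted(scoville))
--     q2 = deque()
--
--     def pop_min():
--         if not q2 or (q1 and q1[0] <= q2[0]):
--             return q1.popleft()
--         return q2.popleft()
--
--     def peek_min():
--         if not q2:
--             return q1[0]
--         if not q1:
--             return q2[0]
--         return min(q1[0], q2[0])
--
--     answer = 0
--     while peek_min() < K:
--         a = pop_min()
--         b = pop_min()
--         q2.append(a + b * 2)
--         answer += 1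
--         if len(q1) + len(q2) == 1 and peek_min() < K:
--             return -1
--     return answer
-- ===== Notes on version B (the rewrite author's own statement) =====
-- stated objective: alternative
-- what changed: Replaces the heap by the two-queue technique: sort once, keep the original values in one FIFO and every mixed value in a second FIFO that provably stays sorted, so each round reads and removes only the two queue fronts instead of doing heap sift operations (intended as faster; measured 1.55x median at the largest size, not consistently above the 1.5x bar).
import Mathlib
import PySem

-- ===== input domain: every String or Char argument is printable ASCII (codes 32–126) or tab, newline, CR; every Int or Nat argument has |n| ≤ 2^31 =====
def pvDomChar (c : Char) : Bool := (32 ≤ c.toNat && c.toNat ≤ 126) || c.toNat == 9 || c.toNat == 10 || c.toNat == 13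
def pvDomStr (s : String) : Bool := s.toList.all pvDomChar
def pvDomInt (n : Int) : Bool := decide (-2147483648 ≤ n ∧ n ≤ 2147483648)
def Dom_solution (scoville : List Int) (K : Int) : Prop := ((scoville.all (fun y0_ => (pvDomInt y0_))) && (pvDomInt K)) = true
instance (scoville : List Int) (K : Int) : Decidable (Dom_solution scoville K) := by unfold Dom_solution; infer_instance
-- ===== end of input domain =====

-- B replaces A's binary heap by the two-queue technique: sort once, keep originals in one
-- FIFO and mixed values in a second FIFO that provably stays sorted, so each round only
-- reads/removes the two queue fronts; A mutates `scoville` in place (heapify), B does not —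
-- the equivalence proved here is about the RETURN value only.

-- ===== PORT A =====
-- heapq is ported by its contract: the heap is the multiset of its elements, heapify is a
-- rearrangement (multiset identity), scoville[0]/heappop read/remove (an occurrence of) the
-- minimum value, heappush adds an element.  Exact for the return value, which only depends on
-- the multiset of Int values.  The while loop removes one element per iteration, so fuel
-- `length + 1` never runs out on inputs where the Python returns; fuel 0 / empty pops are the
-- IndexError cases (outside Pre_).
def solutionLoop : Nat → List Int → Int → Int → Int
  | 0, _, _, _ => 0                                   -- fuel exhausted (unreachable under Pre_)
  | f + 1, heap, K, answer =>
    match PySem.List.min? heap (fun x => x) with      -- scoville[0] (heap root = min)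
    | none => 0                                       -- IndexError on empty (outside Pre_)
    | some v1 =>
      if v1 < K then
        match PySem.List.remove? heap v1 with         -- heappop: val1 = min, removed
        | none => 0                                   -- unreachable: v1 ∈ heap
        | some h1 =>
          match PySem.List.min? h1 (fun x => x) with
          | none => 0                                 -- IndexError: heappop on empty (outside Pre_)
          | some v2 =>
            match PySem.List.remove? h1 v2 with       -- heappop: val2
            | none => 0                               -- unreachable: v2 ∈ h1
            | some h2 =>
              let h3 := h2 ++ [v1 + v2 * 2]           -- heappush(scoville, val1 + val2*2)
              if h3.length = 1 ∧ (PySem.List.min? h3 (fun x => x)).getD 0 < K then -1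
              else solutionLoop f h3 K (answer + 1)
      else answer

def solution (scoville : List Int) (K : Int) : Int :=
  solutionLoop (scoville.length + 1) scoville K 0

-- ===== PORT B =====
-- Source B: two queues; deque.popleft/append are head-removal/end-append on lists.

-- pop_min(): none = IndexError (q1.popleft() on empty, reachable only with both queues empty)
def popMinB (q1 q2 : List Int) : Option (Int × List Int × List Int) :=
  if q2 = [] ∨ (q1 ≠ [] ∧ q1.headD 0 ≤ q2.headD 0) then
    match q1 with
    | [] => none
    | x :: r => some (x, r, q2)
  else
    match q2 with
    | [] => none                                      -- unreachable: this branch has q2 ≠ []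
    | c :: r => some (c, q1, r)

-- peek_min(): none = IndexError (q1[0] with both queues empty)
def peekMinB (q1 q2 : List Int) : Option Int :=
  match q2 with
  | [] => q1.head?
  | c :: _ =>
    match q1 with
    | [] => some c
    | a :: _ => some (min a c)

-- while loop; one element disappears per round, fuel `length + 1` suffices where Python returns
def solutionAltLoop : Nat → List Int → List Int → Int → Int → Int
  | 0, _, _, _, _ => 0                                -- fuel exhausted (unreachable under Pre_)
  | f + 1, q1, q2, K, answer =>
    match peekMinB q1 q2 with
    | none => 0                                       -- IndexError (outside Pre_)
    | some m =>
      if m < K then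
        match popMinB q1 q2 with
        | none => 0                                   -- unreachable: the queues are nonempty
        | some (a, q1a, q2a) =>
          match popMinB q1a q2a with
          | none => 0                                 -- IndexError: second pop on empty (outside Pre_)
          | some (b, q1b, q2b) =>
            let q2c := q2b ++ [a + b * 2]             -- q2.append(a + b*2)
            if q1b.length + q2c.length = 1 ∧ (peekMinB q1b q2c).getD 0 < K then -1
            else solutionAltLoop f q1b q2c K (answer + 1)
      else answer

def solution_alt (scoville : List Int) (K : Int) : Int :=
  solutionAltLoop (scoville.length + 1) (PySem.List.sorted scoville (fun x => x) false) [] K 0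

-- ===== PRECONDITION & SPEC =====
-- Pre_ excludes exactly the inputs on which the Python A raises IndexError: the empty list
-- (scoville[0]) and a single-element list below K (the second heappop pops an empty heap).
def Pre_solution (scoville : List Int) (K : Int) : Prop :=
  scoville ≠ [] ∧ (scoville.length = 1 → K ≤ scoville.headD 0)
instance (scoville : List Int) (K : Int) : Decidable (Pre_solution scoville K) := by
  unfold Pre_solution; infer_instance
def pvWitness_solution : List Int × Int := ([1, 2, 3, 9, 10, 12], 7)
def Spec_solution (scoville : List Int) (K : Int) (out : Int) : Prop := out = solution_alt scoville K
instance (scoville : List Int) (K : Int) (out : Int) : Decidable (Spec_solution scoville K out) := by unfold Spec_solution; infer_instance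

-- ===== CLAIM (what is proved, stated in full; the proofs are below) =====
def Claim_equal_solution : Prop := ∀ (scoville : List Int) (K : Int), Dom_solution scoville K → Pre_solution scoville K → Spec_solution scoville K (solution scoville K)

-- ===== LEMMAS AND PROOFS =====

-- the invariant tying B's two queues together:
-- q1 is sorted; q2 is sorted AND any later element is at most triple any earlier one
-- (the bound that makes appending the new mix keep q2 sorted, even for negative values);
-- every q2 element is at most triple every q1 element.
def QRel (x y : Int) : Prop := x ≤ y ∧ y ≤ 3 * x
def InvB (q1 q2 : List Int) : Prop :=
  q1.Pairwise (· ≤ ·) ∧ q2.Pairwise QRel ∧ ∀ z ∈ q1, ∀ w ∈ q2, w ≤ 3 * z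

-- PySem.List.min? returns exactly the least value
lemma min?_eq_of_least {h : List Int} {m : Int} (hmem : m ∈ h) (hle : ∀ y ∈ h, m ≤ y) :
    PySem.List.min? h (fun x => x) = some m := by
  rcases hm : PySem.List.min? h (fun x => x) with _ | m'
  · rw [PySem.List.min?_eq_none_iff] at hm
    subst hm; cases hmem
  · have h1 : m' ∈ h := PySem.List.min?_mem hm
    have h2 : ∀ y ∈ h, m' ≤ y := by
      intro y hy; simpa using PySem.List.min?_isMin hm y hy
    rw [le_antisymm (h2 m hmem) (hle m' h1)]

-- everything pop_min / peek_min do in one step, under the invariant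
lemma popMin_spec {q1 q2 : List Int} (hI : InvB q1 q2) (hne : q1 ++ q2 ≠ []) :
    ∃ a q1a q2a, popMinB q1 q2 = some (a, q1a, q2a) ∧
      peekMinB q1 q2 = some a ∧
      (a :: (q1a ++ q2a)).Perm (q1 ++ q2) ∧
      (∀ z ∈ q1 ++ q2, a ≤ z) ∧
      (∀ z ∈ q1a, z ∈ q1) ∧ (∀ w ∈ q2a, w ∈ q2) ∧
      (∀ w ∈ q2a, w ≤ 3 * a) ∧
      InvB q1a q2a := by
  obtain ⟨hs1, hs2, hcross⟩ := hI
  match q1, q2 with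
  | [], [] => exact absurd rfl hne
  | x :: r, [] =>
    refine ⟨x, r, [], ?_, ?_, ?_, ?_, ?_, ?_, ?_, ?_⟩
    · simp [popMinB]
    · simp [peekMinB]
    · simp
    · intro z hz
      simp only [List.append_nil, List.mem_cons] at hz
      rcases hz with rfl | hz
      · exact le_rfl
      · exact List.rel_of_pairwise_cons hs1 hz
    · exact fun z hz => List.mem_cons_of_mem _ hz
    · simp
    · simp
    · exact ⟨hs1.tail, List.Pairwise.nil, by simp⟩
  | [], c :: t =>
    refine ⟨c, [], t, ?_, ?_, ?_, ?_, ?_, ?_, ?_, ?_⟩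
    · simp [popMinB]
    · simp [peekMinB]
    · simp
    · intro z hz
      simp only [List.nil_append, List.mem_cons] at hz
      rcases hz with rfl | hz
      · exact le_rfl
      · exact (List.rel_of_pairwise_cons hs2 hz).1
    · simp
    · exact fun w hw => List.mem_cons_of_mem _ hw
    · intro w hw; exact (List.rel_of_pairwise_cons hs2 hw).2
    · exact ⟨List.Pairwise.nil, hs2.tail, by simp⟩
  | x :: r, c :: t =>
    by_cases hxc : x ≤ c
    · refine ⟨x, r, c :: t, ?_, ?_, ?_, ?_, ?_, ?_, ?_, ?_⟩
      · simp [popMinB, hxc]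
      · simp [peekMinB, min_eq_left hxc]
      · simp
      · intro z hz
        simp only [List.cons_append, List.mem_cons, List.mem_append] at hz
        rcases hz with rfl | hz | hz
        · exact le_rfl
        · exact List.rel_of_pairwise_cons hs1 hz
        · rcases hz with rfl | hz
          · exact hxc
          · exact hxc.trans (List.rel_of_pairwise_cons hs2 hz).1
      · exact fun z hz => List.mem_cons_of_mem _ hz
      · exact fun w hw => hw
      · exact fun w hw => hcross x (by simp) w hw
      · exact ⟨hs1.tail, hs2, fun z hz w hw => hcross z (List.mem_cons_of_mem _ hz) w hw⟩
    · have hcx : c ≤ x := (not_le.mp hxc).le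
      refine ⟨c, x :: r, t, ?_, ?_, ?_, ?_, ?_, ?_, ?_, ?_⟩
      · simp [popMinB, hxc]
      · simp [peekMinB, min_eq_right hcx]
      · exact (List.perm_middle).symm
      · intro z hz
        simp only [List.cons_append, List.mem_cons, List.mem_append] at hz
        rcases hz with rfl | hz | hz
        · exact hcx
        · exact hcx.trans (List.rel_of_pairwise_cons hs1 hz)
        · rcases hz with rfl | hz
          · exact le_rfl
          · exact (List.rel_of_pairwise_cons hs2 hz).1
      · exact fun z hz => hz
      · exact fun w hw => List.mem_cons_of_mem _ hw
      · exact fun w hw => (List.rel_of_pairwise_cons hs2 hw).2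
      · exact ⟨hs1, hs2.tail, fun z hz w hw => hcross z hz w (List.mem_cons_of_mem _ hw)⟩

-- lockstep loop equivalence: A's heap and B's queue pair hold the same multiset
lemma loop_eq : ∀ (f : Nat) (h q1 q2 : List Int) (K answer : Int),
    h.Perm (q1 ++ q2) → InvB q1 q2 →
    solutionLoop f h K answer = solutionAltLoop f q1 q2 K answer := by
  intro f
  induction f with
  | zero => intro h q1 q2 K answer _ _; rfl
  | succ f ih =>
    intro h q1 q2 K answer hp hI
    by_cases hne : q1 ++ q2 = []
    · rw [List.append_eq_nil_iff] at hne
      obtain ⟨h1, h2⟩ := hne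
      subst h1; subst h2
      have : h = [] := List.Perm.eq_nil (by simpa using hp)
      subst this
      simp [solutionLoop, solutionAltLoop, peekMinB, PySem.List.min?]
    · obtain ⟨a, q1a, q2a, hpop, hpeek, hperm1, hleast1, hsub1, hsub2, hbound, hI1⟩ :=
        popMin_spec hI hne
      have hminA : PySem.List.min? h (fun x => x) = some a :=
        min?_eq_of_least (hp.mem_iff.mpr (hperm1.symm.mem_iff.mpr (by simp)))
          (fun y hy => hleast1 y (hp.mem_iff.mp hy))
      by_cases hv : a < K
      · -- A pops a
        have hah : a ∈ h := hp.mem_iff.mpr (hperm1.symm.mem_iff.mpr (by simp))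
        have hrem1 : PySem.List.remove? h a = some (h.erase a) :=
          PySem.List.remove?_eq_some_erase h a hah
        have hp1 : (h.erase a).Perm (q1a ++ q2a) := by
          have := (hp.trans hperm1.symm).erase a
          simpa [List.erase_cons_head] using this
        by_cases hne1 : q1a ++ q2a = []
        · -- second pop on empty: both IndexError paths return the fuel value 0
          have hh1 : h.erase a = [] := List.Perm.eq_nil (by rw [hne1] at hp1; exact hp1)
          have hpop2 : popMinB q1a q2a = none := by
            rw [List.append_eq_nil_iff] at hne1
            obtain ⟨e1, e2⟩ := hne1; subst e1; subst e2
            simp [popMinB]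
          simp only [solutionLoop, solutionAltLoop, hminA, hpeek, hpop, hpop2, hrem1, hh1,
            hv, if_true]
          rfl
        · obtain ⟨b, q1b, q2b, hpop2, _, hperm2, hleast2, hsub1b, hsub2b, _, hI2⟩ :=
            popMin_spec hI1 hne1
          have hbh1 : b ∈ h.erase a := hp1.mem_iff.mpr (hperm2.symm.mem_iff.mpr (by simp))
          have hminA2 : PySem.List.min? (h.erase a) (fun x => x) = some b :=
            min?_eq_of_least hbh1 (fun y hy => hleast2 y (hp1.mem_iff.mp hy))
          have hrem2 : PySem.List.remove? (h.erase a) b = some ((h.erase a).erase b) :=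
            PySem.List.remove?_eq_some_erase _ b hbh1
          have hp2 : ((h.erase a).erase b).Perm (q1b ++ q2b) := by
            have := (hp1.trans hperm2.symm).erase b
            simpa [List.erase_cons_head] using this
          set v := a + b * 2 with hv_def
          set h3 := (h.erase a).erase b ++ [v] with hh3
          set q2c := q2b ++ [v] with hq2c
          have hp3 : h3.Perm (q1b ++ q2c) := by
            have hap := hp2.append_right [v]
            simpa [hh3, hq2c, List.append_assoc] using hap
          have hlen3 : h3.length = q1b.length + q2c.length := by
            simpa [List.length_append] using hp3.length_eq
          -- the invariant survives the append to q2
          have hab : a ≤ b := hleast1 b (hperm1.symm.mem_iff.mpr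
            (List.mem_cons_of_mem _ (hperm2.symm.mem_iff.mpr (by simp))))
          have hInew : InvB q1b q2c := by
            obtain ⟨i1, i2, i3⟩ := hI2
            refine ⟨i1, ?_, ?_⟩
            · rw [hq2c, List.pairwise_append]
              refine ⟨i2, by simp [QRel], ?_⟩
              intro z hz w hw
              simp only [List.mem_singleton] at hw
              subst hw
              have hz3a : z ≤ 3 * a := hbound z (hsub2b z hz)
              have hbz : b ≤ z := hleast2 z (List.mem_append_right q1a (hsub2b z hz))
              constructor <;> simp only [hv_def] <;> omega
            · intro z hz w hw
              rw [hq2c, List.mem_append] at hw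
              rcases hw with hw | hw
              · exact i3 z hz w hw
              · simp only [List.mem_singleton] at hw
                subst hw
                have hbz : b ≤ z := hleast2 z (List.mem_append_left q2a (hsub1b z hz))
                simp only [hv_def]; omega
          -- the two -1 guards agree
          have hguard :
              (h3.length = 1 ∧ (PySem.List.min? h3 (fun x => x)).getD 0 < K) ↔
              (q1b.length + q2c.length = 1 ∧ (peekMinB q1b q2c).getD 0 < K) := by
            by_cases hl : q1b.length + q2c.length = 1
            · have hq1b : q1b = [] := by
                have : q2c.length = q2b.length + 1 := by simp [hq2c]
                have : q1b.length = 0 := by omega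
                exact List.length_eq_zero_iff.mp this
              have hq2b : q2b = [] := by
                have : q2c.length = q2b.length + 1 := by simp [hq2c]
                have : q2b.length = 0 := by omega
                exact List.length_eq_zero_iff.mp this
              have hq2c1 : q2c = [v] := by simp [hq2c, hq2b]
              have hh31 : h3 = [v] := by
                apply List.perm_singleton.mp
                rw [← hq2c1]
                simpa [hq1b] using hp3
              rw [hh31, hq1b, hq2c1]
              simp [PySem.List.min?, peekMinB]
            · have hl' : ¬ h3.length = 1 := by omega
              simp [hl, hl']
          simp only [solutionLoop, solutionAltLoop, hminA, hpeek, hrem1, hminA2, hrem2,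
            hpop, hpop2, hv, if_true]
          rw [← hh3, ← hq2c]
          by_cases hg : q1b.length + q2c.length = 1 ∧ (peekMinB q1b q2c).getD 0 < K
          · rw [if_pos (hguard.mpr hg), if_pos hg]
          · rw [if_neg (fun hc => hg (hguard.mp hc)), if_neg hg]
            exact ih h3 q1b q2c K (answer + 1) hp3 hInew
      · simp [solutionLoop, solutionAltLoop, hminA, hpeek, hv]

-- ===== VERDICT (by name: the statement is the Claim_ definition above) =====
theorem solution_spec : Claim_equal_solution := by
  intro scoville K _ _
  unfold Spec_solution solution solution_alt
  rw [← (PySem.List.length_sorted (xs := scoville) (key := fun x => x) (rev := false))]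
  refine loop_eq _ scoville _ [] K 0 ?_ ?_
  · simpa using (PySem.List.sorted_perm scoville (fun x => x) false).symm
  · exact ⟨PySem.List.sorted_pairwise scoville (fun x => x), List.Pairwise.nil, by simp⟩
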